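-- pv_equiv track=rewrite | github.com/arcqkk5/tprvuik | lab01/simplex_method.py | init_matrix_1
-- ===== SOURCE A (Python) =====
-- def init_matrix_1(c, b, a):
--     m = [[0 for _ in range(4)] for _ in range(4)]
--     for i in range(4):
--         for j in range(4):
--             if i == 3 and j > 0:
--                 m[i][j] = c[j - 1]
--             if i > 2 and j == 0:
--                 m[i][j] = 0
--             if i < 3 and j != 0:
--                 m[i][j] = a[i][j - 1]
--             if i < 3 and j == 0:
--                 m[i][j] = b[i]
--     return m
-- ===== SOURCE B (Python) =====
-- def init_matrix_1(c, b, a):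
--     m = []
--     for i in range(3):
--         m.append([b[i], a[i][0], a[i][1], a[i][2]])
--     m.append([0, c[0], c[1], c[2]])
--     return m
-- ===== Notes on version B (the rewrite author's own statement) =====
-- stated objective: simpler
-- what changed: Builds the 4x4 matrix row-by-row by direct list construction (three constraint rows then the objective row) instead of pre-allocating a zero matrix and mutating cells in a 4x4 nested loop with four guard branches.
import Mathlib
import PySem

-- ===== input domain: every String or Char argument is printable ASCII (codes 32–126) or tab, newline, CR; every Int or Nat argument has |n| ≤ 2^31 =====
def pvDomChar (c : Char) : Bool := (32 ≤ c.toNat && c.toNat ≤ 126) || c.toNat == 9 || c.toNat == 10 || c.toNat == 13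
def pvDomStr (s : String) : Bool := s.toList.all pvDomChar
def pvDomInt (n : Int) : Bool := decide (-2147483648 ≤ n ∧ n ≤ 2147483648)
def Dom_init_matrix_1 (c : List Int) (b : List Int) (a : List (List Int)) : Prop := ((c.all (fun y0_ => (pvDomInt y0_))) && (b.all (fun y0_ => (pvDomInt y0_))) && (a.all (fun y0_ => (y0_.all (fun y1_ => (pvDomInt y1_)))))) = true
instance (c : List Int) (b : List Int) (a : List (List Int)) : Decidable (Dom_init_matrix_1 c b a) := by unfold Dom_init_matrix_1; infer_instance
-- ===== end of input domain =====

-- B builds the matrix row-by-row (three constraint rows, then the objective row) instead of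
-- mutating a pre-allocated zero matrix in a 4x4 nested loop with four guarded branches.

-- ===== PORT A =====
-- m[i][j] = v  (i, j produced by range(4), so always in bounds)
def pvSetCell (m : List (List Int)) (i j : Nat) (v : Int) : List (List Int) :=
  m.modify i (fun row => row.set j v)

def init_matrix_1 (c : List Int) (b : List Int) (a : List (List Int)) : List (List Int) :=
  -- m = [[0]*4]*4 (fresh rows); then the nested loop, each if taken in order
  (List.range 4).foldl (fun m i =>
    (List.range 4).foldl (fun m j =>
      let m := if i = 3 ∧ j > 0 then pvSetCell m i j (PySem.List.pyGetD c ((j : Int) - 1) 0) else m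
      let m := if i > 2 ∧ j = 0 then pvSetCell m i j 0 else m
      let m := if i < 3 ∧ j ≠ 0 then
                 pvSetCell m i j (PySem.List.pyGetD (PySem.List.pyGetD a (i : Int) []) ((j : Int) - 1) 0)
               else m
      let m := if i < 3 ∧ j = 0 then pvSetCell m i j (PySem.List.pyGetD b (i : Int) 0) else m
      m) m)
    (List.replicate 4 (List.replicate 4 (0 : Int)))

-- ===== PORT B =====
def init_matrix_1_alt (c : List Int) (b : List Int) (a : List (List Int)) : List (List Int) :=
  ((List.range 3).foldl (fun m i =>
      let row := PySem.List.pyGetD a (i : Int) []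
      m ++ [[PySem.List.pyGetD b (i : Int) 0,
             PySem.List.pyGetD row 0 0, PySem.List.pyGetD row 1 0, PySem.List.pyGetD row 2 0]]) [])
  ++ [[0, PySem.List.pyGetD c 0 0, PySem.List.pyGetD c 1 0, PySem.List.pyGetD c 2 0]]

-- ===== PRECONDITION & SPEC =====
-- A raises IndexError when c, b or a has fewer than 3 entries or one of a's first 3 rows has
-- fewer than 3 entries; B raises there too. Pre_ excludes exactly those inputs.
def Pre_init_matrix_1 (c : List Int) (b : List Int) (a : List (List Int)) : Prop :=
  3 ≤ c.length ∧ 3 ≤ b.length ∧ 3 ≤ a.length ∧ ∀ row ∈ a.take 3, 3 ≤ row.length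
instance (c : List Int) (b : List Int) (a : List (List Int)) : Decidable (Pre_init_matrix_1 c b a) := by unfold Pre_init_matrix_1; infer_instance

def pvWitness_init_matrix_1 : List Int × List Int × List (List Int) :=
  ([1, 2, 3], [4, 5, 6], [[1, 0, 0], [0, 1, 0], [0, 0, 1]])

def Spec_init_matrix_1 (c : List Int) (b : List Int) (a : List (List Int)) (out : List (List Int)) : Prop := out = init_matrix_1_alt c b a
instance (c : List Int) (b : List Int) (a : List (List Int)) (out : List (List Int)) : Decidable (Spec_init_matrix_1 c b a out) := by unfold Spec_init_matrix_1; infer_instance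

-- ===== CLAIM (what is proved, stated in full; the proofs are below) =====
def Claim_equal_init_matrix_1 : Prop := ∀ (c : List Int) (b : List Int) (a : List (List Int)), Dom_init_matrix_1 c b a → Pre_init_matrix_1 c b a → Spec_init_matrix_1 c b a (init_matrix_1 c b a)

-- ===== LEMMAS AND PROOFS =====

-- ===== VERDICT (by name: the statement is the Claim_ definition above) =====
theorem init_matrix_1_spec : Claim_equal_init_matrix_1 := by
  intro c b a _ hpre
  obtain ⟨hc, hb, ha, hrows⟩ := hpre
  match c, b, a with
  | c0 :: c1 :: c2 :: _, b0 :: b1 :: b2 :: _, r0 :: r1 :: r2 :: _ =>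
    have h0 := hrows r0 (by simp)
    have h1 := hrows r1 (by simp)
    have h2 := hrows r2 (by simp)
    match r0, r1, r2 with
    | x0 :: x1 :: x2 :: _, y0 :: y1 :: y2 :: _, z0 :: z1 :: z2 :: _ =>
      simp [Spec_init_matrix_1, init_matrix_1, init_matrix_1_alt, pvSetCell,
        List.range_succ, PySem.List.pyGetD, PySem.List.pyGet?]
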